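-- pv_equiv track=rewrite | github.com/vosslab/python-populous-nvl | populous_game/password_codec.py | decode_password
-- ===== SOURCE A (Python) =====
-- ALPHABET: str = 'ABCDEFGHIJKLMNOPQRSTUVWXYZ'
--
-- PASSWORD_LENGTH: int = 7
--
-- def decode_password(password: str) -> int:
-- 	"""Decode a 1..7-letter uppercase password into the original seed."""
-- 	if not isinstance(password, str):
-- 		raise ValueError('password must be a string')
-- 	upper = password.upper()
-- 	if len(upper) == 0 or len(upper) > PASSWORD_LENGTH:
-- 		raise ValueError(f'password length must be 1..{PASSWORD_LENGTH}')
-- 	for ch in upper: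
-- 		if ch not in ALPHABET:
-- 			raise ValueError(f'invalid character in password: {ch!r}')
-- 	# Left-pad with 'A' (= 0) so the value reflects high-order digits
-- 	padded = upper.rjust(PASSWORD_LENGTH, 'A')
-- 	value = 0
-- 	for ch in padded:
-- 		value = value * 26 + ALPHABET.index(ch)
-- 	return value
-- ===== SOURCE B (Python) =====
-- ALPHABET: str = 'ABCDEFGHIJKLMNOPQRSTUVWXYZ'
--
-- PASSWORD_LENGTH: int = 7
--
-- def decode_password(password: str) -> int:
-- 	"""Decode a 1..7-letter uppercase password into the original seed."""
-- 	if not isinstance(password, str):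
-- 		raise ValueError('password must be a string')
-- 	upper = password.upper()
-- 	if len(upper) == 0 or len(upper) > PASSWORD_LENGTH:
-- 		raise ValueError(f'password length must be 1..{PASSWORD_LENGTH}')
-- 	for ch in upper:
-- 		if ch not in ALPHABET:
-- 			raise ValueError(f'invalid character in password: {ch!r}')
-- 	# No padding: 'A' = 0, so leading pad digits contribute nothing.
-- 	# Evaluate the positional weighted sum right-to-left.
-- 	value = 0
-- 	power = 1
-- 	for ch in reversed(upper):
-- 		value += ALPHABET.index(ch) * power
-- 		power *= 26
-- 	return value
-- ===== Notes on version B (the rewrite author's own statement) =====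
-- stated objective: simpler
-- what changed: Replaces A's left-pad-to-7 plus left-to-right Horner accumulation with an unpadded right-to-left weighted sum maintaining a running power of 26 (valid because the pad digit 'A' is 0).
import Mathlib
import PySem

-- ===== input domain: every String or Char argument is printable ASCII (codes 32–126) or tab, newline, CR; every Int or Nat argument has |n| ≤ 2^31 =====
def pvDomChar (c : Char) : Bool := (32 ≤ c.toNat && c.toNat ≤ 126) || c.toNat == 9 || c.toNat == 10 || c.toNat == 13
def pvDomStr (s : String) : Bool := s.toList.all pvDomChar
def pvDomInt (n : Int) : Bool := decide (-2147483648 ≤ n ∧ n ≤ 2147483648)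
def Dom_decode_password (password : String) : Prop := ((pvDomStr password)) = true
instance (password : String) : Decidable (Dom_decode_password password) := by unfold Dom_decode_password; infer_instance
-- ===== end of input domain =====

-- B replaces A's left-pad + Horner accumulation with an unpadded right-to-left weighted sum ('A' = 0 makes the pad a no-op); objective: simpler.


-- ===== PORT A =====
def pvALPHABET : List Char := "ABCDEFGHIJKLMNOPQRSTUVWXYZ".toList

-- ALPHABET.index(ch): inside Pre_ the character is always present, getD 0 is never taken
def pvIdx (ch : Char) : Int := ((PySem.List.index? pvALPHABET ch).getD 0 : Nat)

def decode_password (password : String) : Int :=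
  -- the isinstance / length / membership checks raise on failure; those inputs are outside Pre_
  let upper := (PySem.Str.upper password).toList
  -- padded = upper.rjust(7, 'A')
  let padded := List.replicate (7 - upper.length) 'A' ++ upper
  padded.foldl (fun value ch => value * 26 + pvIdx ch) 0

-- ===== PORT B =====
def decode_password_alt (password : String) : Int :=
  -- same validation prologue (raises are outside Pre_); then reversed weighted sum
  let upper := (PySem.Str.upper password).toList
  let vp := upper.reverse.foldl (fun (s : Int × Int) ch => (s.1 + pvIdx ch * s.2, s.2 * 26)) (0, 1)
  vp.1

-- ===== PRECONDITION & SPEC =====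
-- Pre_ excludes exactly the inputs on which A raises ValueError: empty or longer-than-7
-- passwords, and passwords whose uppercased characters are not all in ALPHABET.
def Pre_decode_password (password : String) : Prop :=
  1 ≤ (PySem.Str.upper password).toList.length ∧
  (PySem.Str.upper password).toList.length ≤ 7 ∧
  ((PySem.Str.upper password).toList.all (fun c => pvALPHABET.contains c)) = true
instance (password : String) : Decidable (Pre_decode_password password) := by
  unfold Pre_decode_password; infer_instance

def pvWitness_decode_password : String := "GqZ"

def Spec_decode_password (password : String) (out : Int) : Prop := out = decode_password_alt password
instance (password : String) (out : Int) : Decidable (Spec_decode_password password out) := by unfold Spec_decode_password; infer_instance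

-- ===== CLAIM (what is proved, stated in full; the proofs are below) =====
def Claim_equal_decode_password : Prop := ∀ (password : String), Dom_decode_password password → Pre_decode_password password → Spec_decode_password password (decode_password password)

-- ===== LEMMAS AND PROOFS =====

-- the canonical value of a digit string: idx of head weighted by 26^(#remaining digits)
def pvVal : List Char → Int
  | [] => 0
  | c :: t => pvIdx c * 26 ^ t.length + pvVal t

theorem pvHorner (l : List Char) : ∀ v : Int,
    l.foldl (fun value ch => value * 26 + pvIdx ch) v = v * 26 ^ l.length + pvVal l := by
  induction l with
  | nil => intro v; simp [pvVal]
  | cons c t ih =>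
    intro v
    simp only [List.foldl_cons, ih, pvVal, List.length_cons]
    ring

theorem pvPadZero (n : Nat) : pvVal (List.replicate n 'A') = 0 := by
  induction n with
  | zero => rfl
  | succ m ih => simp [List.replicate_succ, pvVal, ih, show pvIdx 'A' = 0 by decide]

theorem pvWeighted (l : List Char) : ∀ v p : Int,
    l.reverse.foldl (fun (s : Int × Int) ch => (s.1 + pvIdx ch * s.2, s.2 * 26)) (v, p)
      = (v + p * pvVal l, p * 26 ^ l.length) := by
  induction l with
  | nil => intro v p; simp [pvVal]
  | cons c t ih =>
    intro v p
    simp only [List.reverse_cons, List.foldl_append, ih, List.foldl_cons, List.foldl_nil,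
      pvVal, List.length_cons, Prod.mk.injEq]
    constructor <;> ring

-- ===== VERDICT (by name: the statement is the Claim_ definition above) =====
theorem decode_password_spec : Claim_equal_decode_password := by
  intro password _ _
  unfold Spec_decode_password decode_password decode_password_alt
  simp only [List.foldl_append, pvHorner, pvWeighted, pvPadZero]
  ring
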